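-- pv_equiv track=rewrite | github.com/promeosenergies-svg/promeos-poc | backend/services/compliance_rule_mapping.py | regulation_worst_status
-- ===== SOURCE A (Python) =====
-- _REGULATION_ALIASES: dict[str, str] = {
--     # Décret Tertiaire
--     "decret_tertiaire_operat": "decret_tertiaire",
--     "decret_tertiaire": "decret_tertiaire",
--     "tertiaire_operat": "decret_tertiaire",
--     # BACS
--     "bacs": "bacs",
--     # APER
--     "aper": "aper",
--     # DPE
--     "dpe_tertiaire": "dpe_tertiaire",
--     "dpe": "dpe_tertiaire",
-- }
--
-- def canonicalize_regulation(label: str | None) -> str | None: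
--     """Retourne le nom canonique de la régulation, ou None si inconnu."""
--     if not label:
--         return None
--     return _REGULATION_ALIASES.get(str(label).strip().lower())
--
-- STATUS_OK = "OK"
--
-- STATUS_ISSUE = "ISSUE"
--
-- STATUS_UNKNOWN = "UNKNOWN"
--
-- STATUS_OUT_OF_SCOPE = "OUT_OF_SCOPE"
--
-- _STATUS_NORMALIZATION = {
--     # compliance_rules vocab
--     "OK": STATUS_OK,
--     "NOK": STATUS_ISSUE,
--     "UNKNOWN": STATUS_UNKNOWN,
--     "OUT_OF_SCOPE": STATUS_OUT_OF_SCOPE,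
--     # regops vocab
--     "COMPLIANT": STATUS_OK,
--     "NON_COMPLIANT": STATUS_ISSUE,
--     "AT_RISK": STATUS_ISSUE,
--     "EXEMPTION_POSSIBLE": STATUS_ISSUE,
-- }
--
-- def categorize_finding_status(raw_status: str | None) -> str:
--     """Normalise le statut brut d'un finding vers la granularité cross-moteur.
--
--     Les deux moteurs utilisent des vocabulaires différents (NOK vs AT_RISK,
--     COMPLIANT vs OK). Cette fonction produit 4 catégories communes pour que
--     le test de cohérence puisse comparer les deux sans biais de vocabulaire.
--     """
--     if raw_status is None:
--         return STATUS_UNKNOWN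
--     return _STATUS_NORMALIZATION.get(str(raw_status).upper(), STATUS_UNKNOWN)
--
-- def regulation_worst_status(
--     findings: list[tuple[str, str]],
-- ) -> dict[str, str]:
--     """Retourne le pire statut par régulation à partir d'une liste (regulation, status).
--
--     Le champ `regulation` est la clé primaire (canonicalisée via
--     canonicalize_regulation) — `rule_id` n'est PAS utilisé pour l'attribution,
--     car certains rule_ids comme OUT_OF_SCOPE sont partagés entre moteurs.
--     Règle d'agrégation : ISSUE > UNKNOWN > OUT_OF_SCOPE > OK.
--     """
--     severity = {STATUS_ISSUE: 3, STATUS_UNKNOWN: 2, STATUS_OUT_OF_SCOPE: 1, STATUS_OK: 0}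
--     worst: dict[str, str] = {}
--     for raw_regulation, raw_status in findings:
--         reg = canonicalize_regulation(raw_regulation)
--         if reg is None:
--             continue
--         normalized = categorize_finding_status(raw_status)
--         current = worst.get(reg)
--         if current is None or severity[normalized] > severity[current]:
--             worst[reg] = normalized
--     return worst
-- ===== SOURCE B (Python) =====
-- _REGULATION_ALIASES: dict[str, str] = {
--     "decret_tertiaire_operat": "decret_tertiaire",
--     "decret_tertiaire": "decret_tertiaire",
--     "tertiaire_operat": "decret_tertiaire",
--     "bacs": "bacs",
--     "aper": "aper",
--     "dpe_tertiaire": "dpe_tertiaire",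
--     "dpe": "dpe_tertiaire",
-- }
--
--
-- def canonicalize_regulation(label):
--     if not label:
--         return None
--     return _REGULATION_ALIASES.get(str(label).strip().lower())
--
--
-- STATUS_OK = "OK"
-- STATUS_ISSUE = "ISSUE"
-- STATUS_UNKNOWN = "UNKNOWN"
-- STATUS_OUT_OF_SCOPE = "OUT_OF_SCOPE"
--
-- _STATUS_NORMALIZATION = {
--     "OK": STATUS_OK,
--     "NOK": STATUS_ISSUE,
--     "UNKNOWN": STATUS_UNKNOWN,
--     "OUT_OF_SCOPE": STATUS_OUT_OF_SCOPE,
--     "COMPLIANT": STATUS_OK,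
--     "NON_COMPLIANT": STATUS_ISSUE,
--     "AT_RISK": STATUS_ISSUE,
--     "EXEMPTION_POSSIBLE": STATUS_ISSUE,
-- }
--
--
-- def categorize_finding_status(raw_status):
--     if raw_status is None:
--         return STATUS_UNKNOWN
--     return _STATUS_NORMALIZATION.get(str(raw_status).upper(), STATUS_UNKNOWN)
--
--
-- def regulation_worst_status(findings):
--     """Worst status per regulation, by severity rank in an ordered list.
--
--     One pass canonicalizes; the keys are the distinct canonical regulations in
--     first-appearance order; each result value is computed by taking the max
--     severity RANK (index in the order list) over that regulation's findings
--     and mapping the rank back to its name. ISSUE > UNKNOWN > OUT_OF_SCOPE > OK.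
--     """
--     order = [STATUS_OK, STATUS_OUT_OF_SCOPE, STATUS_UNKNOWN, STATUS_ISSUE]
--     canon = [canonicalize_regulation(reg) for reg, _ in findings]
--     keys = []
--     for c in canon:
--         if c is not None and c not in keys:
--             keys.append(c)
--     return {
--         k: order[max(order.index(categorize_finding_status(s))
--                      for c, (_, s) in zip(canon, findings) if c == k)]
--         for k in keys
--     }
-- ===== Notes on version B (the rewrite author's own statement) =====
-- stated objective: alternative
-- what changed: B drops A's running-worst dict entirely: it canonicalizes in one pass, collects the distinct canonical regulations in first-appearance order, and for each one takes max() of the severity RANKS (index in an ordered status list) over that regulation's findings in a filtered zip, mapping the winning rank back to its name; equivalence holds because ranks equal A's severity map and max over ints picks the same worst status.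
import Mathlib
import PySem

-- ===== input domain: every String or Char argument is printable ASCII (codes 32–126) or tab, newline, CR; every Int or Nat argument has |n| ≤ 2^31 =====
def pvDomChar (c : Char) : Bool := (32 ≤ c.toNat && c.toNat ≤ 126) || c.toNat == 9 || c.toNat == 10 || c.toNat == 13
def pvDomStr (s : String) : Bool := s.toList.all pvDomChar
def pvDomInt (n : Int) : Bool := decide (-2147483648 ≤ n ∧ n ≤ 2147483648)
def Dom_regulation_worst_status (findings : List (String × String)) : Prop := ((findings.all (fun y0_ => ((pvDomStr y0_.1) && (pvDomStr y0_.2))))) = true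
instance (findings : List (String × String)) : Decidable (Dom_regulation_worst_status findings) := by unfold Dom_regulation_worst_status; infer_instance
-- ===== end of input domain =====

-- B replaces A's running-worst dict by a rank-based staged computation: collect the distinct
-- canonical regulations in first-appearance order, then for each take max() of severity ranks
-- over a filtered zip and map the rank back to its name; same result, different structure.


-- ===== PORT A =====
-- _REGULATION_ALIASES (module-level dict, insertion order)
def pvAliases : PySem.Dict String String := PySem.Dict.mk [
  ("decret_tertiaire_operat", "decret_tertiaire"),
  ("decret_tertiaire", "decret_tertiaire"),
  ("tertiaire_operat", "decret_tertiaire"),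
  ("bacs", "bacs"),
  ("aper", "aper"),
  ("dpe_tertiaire", "dpe_tertiaire"),
  ("dpe", "dpe_tertiaire")]

-- canonicalize_regulation; labels are String here, so `not label` is the empty-string test
def pvCanon (label : String) : Option String :=
  if label = "" then none
  else pvAliases.get? (PySem.Str.lower (PySem.Str.strip label))

-- _STATUS_NORMALIZATION
def pvStatusNorm : PySem.Dict String String := PySem.Dict.mk [
  ("OK", "OK"), ("NOK", "ISSUE"), ("UNKNOWN", "UNKNOWN"), ("OUT_OF_SCOPE", "OUT_OF_SCOPE"),
  ("COMPLIANT", "OK"), ("NON_COMPLIANT", "ISSUE"), ("AT_RISK", "ISSUE"),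
  ("EXEMPTION_POSSIBLE", "ISSUE")]

-- categorize_finding_status; raw_status is String here, so the `is None` branch is unreachable
def pvCat (raw_status : String) : String :=
  pvStatusNorm.getD (PySem.Str.upper raw_status) "UNKNOWN"

def pvSeverityD : PySem.Dict String Int := PySem.Dict.mk [
  ("ISSUE", 3), ("UNKNOWN", 2), ("OUT_OF_SCOPE", 1), ("OK", 0)]

-- severity[x]: x is always a value of pvCat, i.e. one of the four keys, so the
-- dict subscript never raises and getD's default 0 is unreachable — exact there.
def pvSev (s : String) : Int := pvSeverityD.getD s 0

def regulation_worst_status (findings : List (String × String)) : List (String × String) :=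
  (findings.foldl (fun worst p =>
      match pvCanon p.1 with
      | none => worst
      | some reg =>
          let normalized := pvCat p.2
          match worst.get? reg with
          | none => worst.insert reg normalized
          | some current =>
            if pvSev normalized > pvSev current then worst.insert reg normalized else worst)
    PySem.Dict.empty).items

-- ===== PORT B =====
-- order = [STATUS_OK, STATUS_OUT_OF_SCOPE, STATUS_UNKNOWN, STATUS_ISSUE]
def pvOrder : List String := ["OK", "OUT_OF_SCOPE", "UNKNOWN", "ISSUE"]

-- order.index(x): x is always a pvCat output, i.e. one of the four names of pvOrder,
-- so .index never raises and getD's default 0 is unreachable — exact there.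
def pvIdx (s : String) : Int := ((PySem.List.index? pvOrder s).getD 0 : Nat)

def regulation_worst_status_alt (findings : List (String × String)) : List (String × String) :=
  -- canon = [canonicalize_regulation(reg) for reg, _ in findings]
  let canon := findings.map (fun p => pvCanon p.1)
  -- keys: distinct canonical regulations in first-appearance order
  let keys := canon.foldl (fun ks c =>
      match c with
      | none => ks
      | some k => if k ∈ ks then ks else ks ++ [k]) []
  -- {k: order[max(order.index(categorize(s)) for c,(_,s) in zip(canon,findings) if c == k)] for k in keys};
  -- each key has at least one matching finding, so max() never raises and the getD defaults are unreachable.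
  keys.map (fun k =>
    (k, (PySem.List.pyGet? pvOrder
          ((PySem.List.max? (((canon.zip findings).filter (fun q => q.1 == some k)).map
              (fun q => pvIdx (pvCat q.2.2))) (fun v => v)).getD 0)).getD "UNKNOWN"))

-- ===== PRECONDITION & SPEC =====
def Spec_regulation_worst_status (findings : List (String × String)) (out : List (String × String)) : Prop := out = regulation_worst_status_alt findings
instance (findings : List (String × String)) (out : List (String × String)) : Decidable (Spec_regulation_worst_status findings out) := by unfold Spec_regulation_worst_status; infer_instance

-- ===== CLAIM (what is proved, stated in full; the proofs are below) =====
def Claim_equal_regulation_worst_status : Prop := ∀ (findings : List (String × String)), Dom_regulation_worst_status findings → Spec_regulation_worst_status findings (regulation_worst_status findings)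

-- ===== LEMMAS AND PROOFS =====

-- A's loop body, named for the proofs
def pvStepA (worst : PySem.Dict String String) (p : String × String) : PySem.Dict String String :=
  match pvCanon p.1 with
  | none => worst
  | some reg =>
      let normalized := pvCat p.2
      match worst.get? reg with
      | none => worst.insert reg normalized
      | some current =>
        if pvSev normalized > pvSev current then worst.insert reg normalized else worst

-- B's pieces, named for the proofs
def pvKeyStep (ks : List String) (c : Option String) : List String :=
  match c with
  | none => ks
  | some k => if k ∈ ks then ks else ks ++ [k]

def pvKeys (cs : List (Option String)) : List String := cs.foldl pvKeyStep []

def pvVals (fs : List (String × String)) (k : String) : List Int :=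
  (((fs.map (fun p => pvCanon p.1)).zip fs).filter (fun q => q.1 == some k)).map
    (fun q => pvIdx (pvCat q.2.2))

def pvName (i : Int) : String := (PySem.List.pyGet? pvOrder i).getD "UNKNOWN"

def pvBest (fs : List (String × String)) (k : String) : String :=
  pvName ((PySem.List.max? (pvVals fs k) (fun v => v)).getD 0)

lemma pv_alt_eq (fs : List (String × String)) :
    regulation_worst_status_alt fs =
      (pvKeys (fs.map (fun p => pvCanon p.1))).map (fun k => (k, pvBest fs k)) := rfl

lemma pv_a_eq (fs : List (String × String)) :
    regulation_worst_status fs = (fs.foldl pvStepA PySem.Dict.empty).items := rfl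

lemma pvCat_cases (s : String) :
    pvCat s = "OK" ∨ pvCat s = "OUT_OF_SCOPE" ∨ pvCat s = "UNKNOWN" ∨ pvCat s = "ISSUE" := by
  unfold pvCat PySem.Dict.getD PySem.Dict.get? pvStatusNorm
  cases h : List.find? (fun p => p.1 == PySem.Str.upper s)
      (PySem.Dict.mk [("OK", "OK"), ("NOK", "ISSUE"), ("UNKNOWN", "UNKNOWN"),
        ("OUT_OF_SCOPE", "OUT_OF_SCOPE"), ("COMPLIANT", "OK"), ("NON_COMPLIANT", "ISSUE"),
        ("AT_RISK", "ISSUE"), ("EXEMPTION_POSSIBLE", "ISSUE")]).items with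
  | none => simp
  | some q =>
    have hmem := List.mem_of_find?_eq_some h
    simp only [List.mem_cons, List.not_mem_nil, or_false] at hmem
    rcases hmem with h1|h1|h1|h1|h1|h1|h1|h1 <;> subst h1 <;> simp

-- for any pvCat output n: rank = severity, severity in 0..3, and name-of-severity is n
lemma pv_idx_sev (s : String) : pvIdx (pvCat s) = pvSev (pvCat s) := by
  rcases pvCat_cases s with h|h|h|h <;> rw [h] <;> decide

lemma pv_name_sev (s : String) : pvName (pvSev (pvCat s)) = pvCat s := by
  rcases pvCat_cases s with h|h|h|h <;> rw [h] <;> decide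

lemma pv_sev_name_of_mem {fs : List (String × String)} {k : String} {v : Int}
    (hv : v ∈ pvVals fs k) : pvSev (pvName v) = v := by
  unfold pvVals at hv
  obtain ⟨q, _, hq⟩ := List.mem_map.mp hv
  rw [← hq, pv_idx_sev]
  rcases pvCat_cases q.2.2 with h|h|h|h <;> rw [h] <;> decide

-- keys over a snoc
lemma pv_keys_snoc (cs : List (Option String)) (c : Option String) :
    pvKeys (cs ++ [c]) = pvKeyStep (pvKeys cs) c := by
  simp [pvKeys, List.foldl_append]

lemma pv_mem_keys_aux (cs : List (Option String)) :
    ∀ (acc : List String) (k : String),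
      k ∈ cs.foldl pvKeyStep acc ↔ k ∈ acc ∨ some k ∈ cs := by
  induction cs with
  | nil => intro acc k; simp
  | cons c t ih =>
    intro acc k
    simp only [List.foldl_cons, ih, List.mem_cons]
    cases c with
    | none => simp [pvKeyStep]
    | some r =>
      by_cases hkr : k = r
      · subst hkr
        by_cases hr : k ∈ acc <;> simp [pvKeyStep, hr]
      · by_cases hr : r ∈ acc <;>
          simp [pvKeyStep, hr, hkr]

lemma pv_mem_keys (cs : List (Option String)) (k : String) :
    k ∈ pvKeys cs ↔ some k ∈ cs := by
  simpa using pv_mem_keys_aux cs [] k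

lemma pv_keys_nodup_aux (cs : List (Option String)) :
    ∀ (acc : List String), acc.Nodup → (cs.foldl pvKeyStep acc).Nodup := by
  induction cs with
  | nil => intro acc h; simpa using h
  | cons c t ih =>
    intro acc h
    simp only [List.foldl_cons]
    apply ih
    cases c with
    | none => simpa [pvKeyStep] using h
    | some r =>
      by_cases hr : r ∈ acc
      · simpa [pvKeyStep, hr] using h
      · simp only [pvKeyStep, if_neg hr]
        rw [List.nodup_append]
        refine ⟨h, List.nodup_singleton r, ?_⟩
        intro a ha b hb
        rw [List.mem_singleton] at hb
        subst hb
        intro e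
        exact hr (e ▸ ha)

lemma pv_keys_nodup (cs : List (Option String)) : (pvKeys cs).Nodup :=
  pv_keys_nodup_aux cs [] List.nodup_nil

-- vals over a snoc
lemma pv_vals_snoc (fs : List (String × String)) (p : String × String) (k : String) :
    pvVals (fs ++ [p]) k =
      pvVals fs k ++ (if pvCanon p.1 = some k then [pvIdx (pvCat p.2)] else []) := by
  unfold pvVals
  rw [List.map_append, List.zip_append (by simp), List.filter_append, List.map_append]
  congr 1
  by_cases h : pvCanon p.1 = some k <;> simp [h]

lemma pv_vals_nil_iff (fs : List (String × String)) (k : String) :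
    pvVals fs k = [] ↔ some k ∉ fs.map (fun p => pvCanon p.1) := by
  induction fs with
  | nil => simp [pvVals]
  | cons p t ih =>
    unfold pvVals at ih ⊢
    simp only [List.map_cons, List.zip_cons_cons, List.filter_cons]
    by_cases h : pvCanon p.1 = some k
    · simp [h]
    · rw [if_neg (by simp [h]), ih]
      constructor
      · intro hn hmem
        rcases List.mem_cons.mp hmem with h1 | h1
        · exact h h1.symm
        · exact hn h1
      · intro hn hmem
        exact hn (List.mem_cons_of_mem _ hmem)

-- running-max over a snoc
lemma pv_max_snoc {l : List Int} {m : Int} (x : Int)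
    (hm : PySem.List.max? l (fun v => v) = some m) :
    PySem.List.max? (l ++ [x]) (fun v => v) = some (if m < x then x else m) := by
  unfold PySem.List.max? at hm ⊢
  rw [List.foldl_append, hm]
  simp only [List.foldl_cons, List.foldl_nil]
  split <;> rfl

-- main invariant: A's dict after the fold is B's keys/best map of the processed prefix
lemma pv_main (fs : List (String × String)) :
    (fs.foldl pvStepA PySem.Dict.empty).items =
      (pvKeys (fs.map (fun p => pvCanon p.1))).map (fun k => (k, pvBest fs k)) := by
  induction fs using List.reverseRecOn with
  | nil => rfl
  | append_singleton fs p ih =>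
    have hkeys : ((fs ++ [p]).map (fun q => pvCanon q.1)) =
        fs.map (fun q => pvCanon q.1) ++ [pvCanon p.1] := by simp
    set K := pvKeys (fs.map (fun q => pvCanon q.1)) with hK
    set D := fs.foldl pvStepA PySem.Dict.empty with hD
    have hDkeys : D.keys = K := by
      simp only [PySem.Dict.keys, ih, List.map_map]
      exact (List.map_congr_left (fun a _ => rfl) :
        List.map _ K = List.map id K).trans (List.map_id K)
    have hKnodup : K.Nodup := pv_keys_nodup _
    rw [List.foldl_append, List.foldl_cons, List.foldl_nil, hkeys, pv_keys_snoc, ← hK, ← hD]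
    cases hc : pvCanon p.1 with
    | none =>
      have hA : pvStepA D p = D := by simp [pvStepA, hc]
      rw [hA, ih]
      simp only [pvKeyStep]
      apply List.map_congr_left
      intro k _
      have : pvBest (fs ++ [p]) k = pvBest fs k := by
        unfold pvBest
        rw [pv_vals_snoc, hc]
        simp
      rw [this]
    | some r =>
      by_cases hrK : r ∈ K
      · -- existing regulation
        have hvne : pvVals fs r ≠ [] := by
          rw [Ne, pv_vals_nil_iff, not_not]
          exact (pv_mem_keys _ r).mp (hK ▸ hrK)
        obtain ⟨m, hm⟩ : ∃ m, PySem.List.max? (pvVals fs r) (fun v => v) = some m := by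
          cases hmx : PySem.List.max? (pvVals fs r) (fun v => v) with
          | none => exact absurd ((PySem.List.max?_eq_none_iff _ _).mp hmx) hvne
          | some m => exact ⟨m, rfl⟩
        have hmmem : m ∈ pvVals fs r := PySem.List.max?_mem hm
        have hbest : pvBest fs r = pvName m := by unfold pvBest; rw [hm]; rfl
        have hsevname : pvSev (pvName m) = m := pv_sev_name_of_mem hmmem
        have hget : D.get? r = some (pvBest fs r) := by
          apply PySem.Dict.get?_of_mem_items
          · rw [ih]; exact List.mem_map.mpr ⟨r, hrK, rfl⟩
          · rw [hDkeys]; exact hKnodup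
        have hcont : D.contains r = true := by
          rw [PySem.Dict.contains_eq_decide_mem_keys, hDkeys]; simp [hrK]
        have hbestsnoc : pvBest (fs ++ [p]) r =
            pvName (if m < pvIdx (pvCat p.2) then pvIdx (pvCat p.2) else m) := by
          unfold pvBest
          rw [pv_vals_snoc, hc, if_pos rfl, pv_max_snoc _ hm]
          rfl
        have hothers : ∀ k ∈ K, k ≠ r → pvBest (fs ++ [p]) k = pvBest fs k := by
          intro k _ hk
          unfold pvBest
          rw [pv_vals_snoc, hc]
          simp [Ne.symm hk]
        simp only [pvKeyStep, if_pos hrK]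
        by_cases hcond : pvSev (pvCat p.2) > pvSev (pvBest fs r)
        · -- A overwrites r
          have hA : pvStepA D p = D.insert r (pvCat p.2) := by
            simp [pvStepA, hc, hget, hcond]
          have hidx : pvIdx (pvCat p.2) = pvSev (pvCat p.2) := pv_idx_sev _
          have hmlt : m < pvIdx (pvCat p.2) := by
            rw [hidx]; rw [hbest, hsevname] at hcond; exact hcond
          rw [hA, PySem.Dict.items_insert_of_contains D _ hcont, ih, List.map_map]
          apply List.map_congr_left
          intro k hkK
          by_cases hk : k = r
          · subst hk
            simp only [Function.comp, beq_self_eq_true, if_true]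
            rw [hbestsnoc, if_pos hmlt, hidx, pv_name_sev]
          · simp only [Function.comp, beq_iff_eq, hk, if_false]
            rw [hothers k hkK hk]
        · -- A keeps the current value
          have hA : pvStepA D p = D := by
            simp [pvStepA, hc, hget, hcond]
          have hidx : pvIdx (pvCat p.2) = pvSev (pvCat p.2) := pv_idx_sev _
          have hmge : ¬ m < pvIdx (pvCat p.2) := by
            rw [hidx]; rw [hbest, hsevname] at hcond; omega
          rw [hA, ih]
          apply List.map_congr_left
          intro k hkK
          by_cases hk : k = r
          · subst hk
            rw [hbestsnoc, if_neg hmge, ← hbest]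
          · rw [hothers k hkK hk]
      · -- new regulation
        have hvnil : pvVals fs r = [] := by
          rw [pv_vals_nil_iff]
          exact fun h => hrK ((pv_mem_keys _ r).mpr h)
        have hget : D.get? r = none := by
          rw [PySem.Dict.get?_eq_none_iff_not_mem_keys, hDkeys]; exact hrK
        have hcont : D.contains r = false := by
          rw [PySem.Dict.contains_eq_decide_mem_keys, hDkeys]; simp [hrK]
        have hA : pvStepA D p = D.insert r (pvCat p.2) := by
          simp [pvStepA, hc, hget]
        have hbr : pvBest (fs ++ [p]) r = pvCat p.2 := by
          unfold pvBest
          rw [pv_vals_snoc, hc, if_pos rfl, hvnil]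
          simp only [List.nil_append]
          have : PySem.List.max? [pvIdx (pvCat p.2)] (fun v => v) = some (pvIdx (pvCat p.2)) := rfl
          rw [this]
          simp only [Option.getD_some]
          rw [pv_idx_sev, pv_name_sev]
        rw [hA, PySem.Dict.items_insert_of_not_contains D _ hcont, ih]
        simp only [pvKeyStep, if_neg hrK, List.map_append, List.map_cons, List.map_nil]
        congr 1
        · apply List.map_congr_left
          intro k hkK
          have hk : k ≠ r := fun h => hrK (h ▸ hkK)
          have : pvBest (fs ++ [p]) k = pvBest fs k := by
            unfold pvBest
            rw [pv_vals_snoc, hc]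
            simp [Ne.symm hk]
          rw [this]
        · rw [hbr]

-- ===== VERDICT (by name: the statement is the Claim_ definition above) =====
theorem regulation_worst_status_spec : Claim_equal_regulation_worst_status := by
  intro findings _
  unfold Spec_regulation_worst_status
  rw [pv_a_eq, pv_alt_eq, pv_main]
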